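-- pv_equiv track=rewrite | github.com/frankurcrazy/skill-bazaar | droidrun-portal/scripts/droidutils.py | find_clear_point
-- ===== SOURCE A (Python) =====
-- def find_clear_point(bounds, blockers, depth=0, max_depth=4):
--     """Find unblocked tap point using quadrant subdivision.
--
--     When an element is overlapped by other elements, this finds a point
--     within the element's bounds that isn't blocked.
--
--     Args:
--         bounds: Tuple (l, t, r, b) of target element bounds
--         blockers: List of (l, t, r, b) tuples for overlapping elements
--         depth: Current recursion depth
--         max_depth: Maximum recursion depth
--
--     Returns:
--         (x, y) tuple of clear point, or None if no clear point found
--     """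
--     l, t, r, b = bounds
--     cx, cy = (l + r) // 2, (t + b) // 2
--
--     def is_blocked(x, y):
--         for bl, bt, br, bb in blockers:
--             if bl <= x <= br and bt <= y <= bb:
--                 return True
--         return False
--
--     # Check center point
--     if not is_blocked(cx, cy):
--         return (cx, cy)
--
--     # Stop if too deep or area too small
--     area = (r - l) * (b - t)
--     if depth >= max_depth or area < 100:
--         return None
--
--     # Try quadrants
--     quadrants = [
--         (l, t, cx, cy),      # top-left
--         (cx, t, r, cy),      # top-right
--         (l, cy, cx, b),      # bottom-left
--         (cx, cy, r, b),      # bottom-right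
--     ]
--
--     for q in quadrants:
--         point = find_clear_point(q, blockers, depth + 1, max_depth)
--         if point:
--             return point
--
--     return None
-- ===== SOURCE B (Python) =====
-- def find_clear_point(bounds, blockers, depth=0, max_depth=4):
--     """Iterative re-implementation: explicit stack DFS instead of recursion."""
--     stack = [(bounds, depth)]
--     while stack:
--         (l, t, r, b), d = stack.pop()
--         cx, cy = (l + r) // 2, (t + b) // 2
--         if not any(bl <= cx <= br and bt <= cy <= bb for bl, bt, br, bb in blockers):
--             return (cx, cy)
--         if d < max_depth and (r - l) * (b - t) >= 100:
--             # push in reverse so quadrants are visited TL, TR, BL, BR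
--             stack.append(((cx, cy, r, b), d + 1))
--             stack.append(((l, cy, cx, b), d + 1))
--             stack.append(((cx, t, r, cy), d + 1))
--             stack.append(((l, t, cx, cy), d + 1))
--     return None
-- ===== Notes on version B (the rewrite author's own statement) =====
-- stated objective: alternative
-- what changed: Replaced the recursive quadrant subdivision by an explicit worklist/stack DFS loop (children pushed in reverse so the TL,TR,BL,BR visit order is preserved) and the is_blocked helper loop by any().
import Mathlib
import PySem

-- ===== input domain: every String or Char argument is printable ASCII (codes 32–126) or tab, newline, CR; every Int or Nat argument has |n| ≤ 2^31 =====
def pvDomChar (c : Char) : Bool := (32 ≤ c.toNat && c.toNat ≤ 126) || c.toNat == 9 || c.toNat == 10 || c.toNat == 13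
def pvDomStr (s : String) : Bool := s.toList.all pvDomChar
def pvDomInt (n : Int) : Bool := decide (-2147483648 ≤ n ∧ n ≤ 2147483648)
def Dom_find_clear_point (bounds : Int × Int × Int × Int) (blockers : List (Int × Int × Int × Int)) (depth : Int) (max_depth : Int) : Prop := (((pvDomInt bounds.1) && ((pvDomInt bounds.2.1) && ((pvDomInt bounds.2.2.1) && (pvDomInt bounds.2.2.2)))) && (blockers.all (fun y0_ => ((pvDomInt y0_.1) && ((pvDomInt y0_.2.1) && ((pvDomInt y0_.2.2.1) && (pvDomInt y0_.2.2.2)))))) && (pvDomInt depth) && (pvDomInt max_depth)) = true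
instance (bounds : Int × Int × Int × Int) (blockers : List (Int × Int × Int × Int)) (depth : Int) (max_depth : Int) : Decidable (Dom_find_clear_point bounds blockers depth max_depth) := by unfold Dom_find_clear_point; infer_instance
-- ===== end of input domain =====

-- B replaces the recursive quadrant subdivision with an explicit worklist/stack DFS loop (same visit order, same cost).


-- ===== PORT A =====
-- helper: the inner is_blocked loop (early-return any)
def pvIsBlocked (blockers : List (Int × Int × Int × Int)) (x y : Int) : Bool :=
  blockers.any (fun q => decide (q.1 ≤ x ∧ x ≤ q.2.2.1 ∧ q.2.1 ≤ y ∧ y ≤ q.2.2.2))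

def find_clear_point (bounds : Int × Int × Int × Int) (blockers : List (Int × Int × Int × Int)) (depth : Int) (max_depth : Int) : Option (Int × Int) :=
  let l := bounds.1; let t := bounds.2.1; let r := bounds.2.2.1; let b := bounds.2.2.2
  let cx := PySem.Int.floordiv (l + r) 2
  let cy := PySem.Int.floordiv (t + b) 2
  if pvIsBlocked blockers cx cy = false then some (cx, cy)
  else if h : depth ≥ max_depth ∨ (r - l) * (b - t) < 100 then none
  else
    -- for q in quadrants: point = recurse; if point: return point  (a non-None (x,y) is always truthy)
    match find_clear_point (l, t, cx, cy) blockers (depth + 1) max_depth with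
    | some p => some p
    | none =>
      match find_clear_point (cx, t, r, cy) blockers (depth + 1) max_depth with
      | some p => some p
      | none =>
        match find_clear_point (l, cy, cx, b) blockers (depth + 1) max_depth with
        | some p => some p
        | none =>
          match find_clear_point (cx, cy, r, b) blockers (depth + 1) max_depth with
          | some p => some p
          | none => none
termination_by (max_depth - depth).toNat
decreasing_by all_goals (simp only [not_or, not_lt] at h; omega)

-- ===== PORT B =====
-- B's any(...) generator over blockers
def pvAnyBlocked (blockers : List (Int × Int × Int × Int)) (x y : Int) : Bool :=
  blockers.any (fun q => decide (q.1 ≤ x ∧ x ≤ q.2.2.1 ∧ q.2.1 ≤ y ∧ y ≤ q.2.2.2))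

-- termination weight of a stack node (proof device only)
def pvNodeW (max_depth : Int) (nd : (Int × Int × Int × Int) × Int) : Nat :=
  5 ^ ((max_depth - nd.2).toNat + 1)

-- the while-stack loop of Source B; Python's end-of-list stack top is the list head here,
-- so the four appends (BR, BL, TR, TL) become the cons chain TL :: TR :: BL :: BR
def pvGo (blockers : List (Int × Int × Int × Int)) (max_depth : Int) : List ((Int × Int × Int × Int) × Int) → Option (Int × Int)
  | [] => none
  | ((l, t, r, b), d) :: rest =>
    let cx := PySem.Int.floordiv (l + r) 2
    let cy := PySem.Int.floordiv (t + b) 2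
    if pvAnyBlocked blockers cx cy then
      if h : d < max_depth ∧ (r - l) * (b - t) ≥ 100 then
        pvGo blockers max_depth (((l, t, cx, cy), d + 1) :: ((cx, t, r, cy), d + 1) ::
          ((l, cy, cx, b), d + 1) :: ((cx, cy, r, b), d + 1) :: rest)
      else pvGo blockers max_depth rest
    else some (cx, cy)
termination_by stack => (stack.map (pvNodeW max_depth)).sum
decreasing_by
  · simp only [List.map, List.sum_cons, pvNodeW]
    have hk : (max_depth - (d + 1)).toNat + 1 = (max_depth - d).toNat := by omega
    rw [hk]
    have hp : 0 < 5 ^ (max_depth - d).toNat := Nat.pow_pos (by norm_num)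
    have : 5 ^ ((max_depth - d).toNat + 1) = 5 * 5 ^ (max_depth - d).toNat := by
      rw [Nat.pow_succ, Nat.mul_comm]
    omega
  · simp only [List.map, List.sum_cons, pvNodeW]
    have hp : 0 < 5 ^ ((max_depth - d).toNat + 1) := Nat.pow_pos (by norm_num)
    omega

def find_clear_point_alt (bounds : Int × Int × Int × Int) (blockers : List (Int × Int × Int × Int)) (depth : Int) (max_depth : Int) : Option (Int × Int) :=
  pvGo blockers max_depth [(bounds, depth)]

-- ===== PRECONDITION & SPEC =====
def Spec_find_clear_point (bounds : Int × Int × Int × Int) (blockers : List (Int × Int × Int × Int)) (depth : Int) (max_depth : Int) (out : Option (Int × Int)) : Prop := out = find_clear_point_alt bounds blockers depth max_depth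
instance (bounds : Int × Int × Int × Int) (blockers : List (Int × Int × Int × Int)) (depth : Int) (max_depth : Int) (out : Option (Int × Int)) : Decidable (Spec_find_clear_point bounds blockers depth max_depth out) := by unfold Spec_find_clear_point; infer_instance

-- ===== CLAIM (what is proved, stated in full; the proofs are below) =====
def Claim_equal_find_clear_point : Prop := ∀ (bounds : Int × Int × Int × Int) (blockers : List (Int × Int × Int × Int)) (depth : Int) (max_depth : Int), Dom_find_clear_point bounds blockers depth max_depth → Spec_find_clear_point bounds blockers depth max_depth (find_clear_point bounds blockers depth max_depth)

-- ===== LEMMAS AND PROOFS =====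
-- processing the top stack node is exactly A's recursive call on that node
theorem pvGo_cons (blockers : List (Int × Int × Int × Int)) (md : Int) :
    ∀ n (bounds : Int × Int × Int × Int) (d : Int) (rest : List ((Int × Int × Int × Int) × Int)),
      (md - d).toNat = n →
      pvGo blockers md ((bounds, d) :: rest) =
        (match find_clear_point bounds blockers d md with
         | some p => some p
         | none => pvGo blockers md rest) := by
  intro n
  induction n using Nat.strong_induction_on with
  | _ n ih =>
    intro bounds d rest hn
    obtain ⟨l, t, r, b⟩ := bounds
    rw [pvGo, find_clear_point]
    simp only [pvAnyBlocked, pvIsBlocked]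
    set cx := PySem.Int.floordiv (l + r) 2 with hcx
    set cy := PySem.Int.floordiv (t + b) 2 with hcy
    by_cases hb : (List.any blockers fun q => decide (q.1 ≤ cx ∧ cx ≤ q.2.2.1 ∧ q.2.1 ≤ cy ∧ cy ≤ q.2.2.2)) = true
    · simp only [hb, if_true, Bool.true_eq_false, if_false]
      by_cases hstop : d ≥ md ∨ (r - l) * (b - t) < 100
      · have hstop' : ¬ (d < md ∧ (r - l) * (b - t) ≥ 100) := by omega
        simp only [dif_pos hstop, dif_neg hstop']
      · have hstop' : d < md ∧ (r - l) * (b - t) ≥ 100 := by omega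
        simp only [dif_neg hstop, dif_pos hstop']
        have hlt : (md - (d + 1)).toNat < n := by omega
        have hfuel : (md - (d + 1)).toNat = (md - (d + 1)).toNat := rfl
        rw [ih _ hlt _ _ _ hfuel]
        cases find_clear_point (l, t, cx, cy) blockers (d + 1) md with
        | some p => rfl
        | none =>
          rw [ih _ hlt _ _ _ hfuel]
          cases find_clear_point (cx, t, r, cy) blockers (d + 1) md with
          | some p => rfl
          | none =>
            rw [ih _ hlt _ _ _ hfuel]
            cases find_clear_point (l, cy, cx, b) blockers (d + 1) md with
            | some p => rfl
            | none =>
              rw [ih _ hlt _ _ _ hfuel]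
              cases find_clear_point (cx, cy, r, b) blockers (d + 1) md with
              | some p => rfl
              | none => rfl
    · simp only [Bool.not_eq_true] at hb
      simp only [hb, if_true, Bool.false_eq_true, if_false]

-- ===== VERDICT (by name: the statement is the Claim_ definition above) =====
theorem find_clear_point_spec : Claim_equal_find_clear_point := by
  intro bounds blockers depth max_depth _
  unfold Spec_find_clear_point find_clear_point_alt
  rw [pvGo_cons blockers max_depth (max_depth - depth).toNat bounds depth [] rfl]
  cases h : find_clear_point bounds blockers depth max_depth with
  | some p => rfl
  | none => rw [pvGo]
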